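-- pv_equiv track=rewrite | github.com/ndhineshkumaar/AgileTribers-Internship | Sprint1/Python_Programming_Task_Practice - 3/checkdup.py | checkdup
-- ===== SOURCE A (Python) =====
-- def checkdup(lst):
--     dict={}
--     for i in lst:
--         if i in dict:
--             return True
--         else:
--             dict[i]=1
--     return False
-- ===== SOURCE B (Python) =====
-- def checkdup(lst):
--     return len(set(lst)) != len(lst)
-- ===== Notes on version B (the rewrite author's own statement) =====
-- stated objective: simpler
-- what changed: Replaces the incremental dict scan with an early return by a one-shot cardinality comparison: len(set(lst)) != len(lst); no loop, branch or early exit remains.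
import Mathlib
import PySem

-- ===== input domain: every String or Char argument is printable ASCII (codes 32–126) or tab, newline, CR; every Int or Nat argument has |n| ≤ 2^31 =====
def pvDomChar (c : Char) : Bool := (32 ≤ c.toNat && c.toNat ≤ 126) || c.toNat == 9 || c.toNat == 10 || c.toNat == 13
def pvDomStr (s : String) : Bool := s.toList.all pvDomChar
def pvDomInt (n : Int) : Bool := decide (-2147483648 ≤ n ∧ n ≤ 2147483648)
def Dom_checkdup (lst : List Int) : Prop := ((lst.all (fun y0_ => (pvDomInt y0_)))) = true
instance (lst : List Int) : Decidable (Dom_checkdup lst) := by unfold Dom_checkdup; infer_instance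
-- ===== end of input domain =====

-- B replaces A's incremental dict scan with early exit by a one-shot cardinality comparison (simpler).


-- ===== PORT A =====
-- the 'for i in lst' loop with early 'return True', carrying the dict
def checkdupGo (lst : List Int) (d : PySem.Dict Int Int) : Bool :=
  match lst with
  | [] => false
  | i :: t => if d.contains i then true else checkdupGo t (d.insert i 1)

def checkdup (lst : List Int) : Bool :=
  checkdupGo lst PySem.Dict.empty

-- ===== PORT B =====
-- len(set(lst)) != len(lst)
def checkdup_alt (lst : List Int) : Bool :=
  decide ((PySem.Set.ofList lst).length ≠ lst.length)

-- ===== PRECONDITION & SPEC =====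
def Spec_checkdup (lst : List Int) (out : Bool) : Prop := out = checkdup_alt lst
instance (lst : List Int) (out : Bool) : Decidable (Spec_checkdup lst out) := by unfold Spec_checkdup; infer_instance

-- ===== CLAIM (what is proved, stated in full; the proofs are below) =====
def Claim_equal_checkdup : Prop := ∀ (lst : List Int), Dom_checkdup lst → Spec_checkdup lst (checkdup lst)

-- ===== LEMMAS AND PROOFS =====

-- loop invariant for A's scan
theorem checkdupGo_eq (t : List Int) : ∀ (d : PySem.Dict Int Int),
    checkdupGo t d = !decide (t.Nodup ∧ ∀ x ∈ t, d.contains x = false) := by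
  induction t with
  | nil => intro d; simp [checkdupGo]
  | cons i t ih =>
    intro d
    simp only [checkdupGo]
    by_cases h : d.contains i
    · rw [if_pos h]
      have hP : ¬ ((i :: t).Nodup ∧ ∀ x ∈ i :: t, d.contains x = false) := by
        rintro ⟨_, hall⟩
        have hi := hall i (List.mem_cons_self ..)
        simp [h] at hi
      rw [decide_eq_false hP]
      rfl
    · have hb : d.contains i = false := by simpa using h
      rw [if_neg h, ih]
      congr 1
      rw [decide_eq_decide]
      constructor
      · rintro ⟨hnd, hall⟩
        have hmem : i ∉ t := by
          intro hm
          have := hall i hm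
          simp at this
        refine ⟨List.nodup_cons.mpr ⟨hmem, hnd⟩, ?_⟩
        intro x hx
        rcases List.mem_cons.mp hx with rfl | hx'
        · exact hb
        · have := hall x hx'
          simp [PySem.Dict.contains_insert] at this
          exact this.2
      · rintro ⟨hnd, hall⟩
        rcases List.nodup_cons.mp hnd with ⟨hmem, hnd'⟩
        refine ⟨hnd', ?_⟩
        intro x hx
        have hxi : x ≠ i := fun he => hmem (he ▸ hx)
        simp [PySem.Dict.contains_insert, hxi, hall x (List.mem_cons_of_mem _ hx)]

-- set(lst) has full length iff lst has no duplicates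
theorem ofList_length_eq_iff (lst : List Int) :
    (PySem.Set.ofList lst).length = lst.length ↔ lst.Nodup := by
  have hperm : (PySem.Set.ofList lst).Perm lst.dedup := by
    apply (List.perm_ext_iff_of_nodup (PySem.Set.nodup_ofList lst) lst.nodup_dedup).2
    intro x
    simp [PySem.Set.mem_ofList, List.mem_dedup]
  rw [hperm.length_eq]
  constructor
  · intro h
    have hs : lst.dedup.Sublist lst := lst.dedup_sublist
    have := hs.eq_of_length h
    exact List.dedup_eq_self.mp this
  · intro h
    rw [List.dedup_eq_self.mpr h]

-- ===== VERDICT (by name: the statement is the Claim_ definition above) =====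
theorem checkdup_spec : Claim_equal_checkdup := by
  intro lst _
  show checkdup lst = checkdup_alt lst
  rw [checkdup, checkdupGo_eq, checkdup_alt]
  simp [PySem.Dict.contains_empty, ofList_length_eq_iff]
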